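-- pv_equiv track=rewrite | github.com/Abhi001vj/coding-interview-preparation | leetcode_discussion_google/Find minimum characters to remove to get unique string.py | min_remove_dp
-- ===== SOURCE A (Python) =====
-- def min_remove_dp(s: str) -> int:
--     """
--     DP approach to find minimum removals
--     dp[i][j] = min removals needed for substring s[i:j+1]
--
--     Visual DP table for "abcbb":
--       a  b  c  b  b
--     a 0  0  0  2  2
--     b    0  0  2  2
--     c       0  2  2
--     b          1  2
--     b             1
--     """
--     n = len(s)
--     dp = [[0] * n for _ in range(n)]
--
--     # Process increasing lengths
--     for length in range(2, n + 1):
--         for start in range(n - length + 1):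
--             end = start + length - 1
--
--             # If first and last char are same
--             if s[start] == s[end]:
--                 # Need to remove one of them if length > 2
--                 dp[start][end] = dp[start+1][end-1] + (length > 2)
--             else:
--                 # Try removing either first or last
--                 dp[start][end] = min(
--                     1 + dp[start+1][end],  # Remove first
--                     1 + dp[start][end-1]   # Remove last
--                 )
--
--     return dp[0][n-1]
-- ===== SOURCE B (Python) =====
-- def min_remove_dp(s: str) -> int:
--     memo = {}
--
--     def solve(i, j):
--         if i >= j:
--             return 0
--         key = (i, j)
--         if key in memo:
--             return memo[key]
--         if s[i] == s[j]:
--             r = solve(i + 1, j - 1) + (1 if j - i + 1 > 2 else 0)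
--         else:
--             r = 1 + min(solve(i + 1, j), solve(i, j - 1))
--         memo[key] = r
--         return r
--
--     return solve(0, len(s) - 1)
-- ===== Notes on version B (the rewrite author's own statement) =====
-- stated objective: alternative
-- what changed: Replaces the bottom-up length-by-length DP table with a top-down memoized recursion solve(i,j) started at (0, n-1).
import Mathlib
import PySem

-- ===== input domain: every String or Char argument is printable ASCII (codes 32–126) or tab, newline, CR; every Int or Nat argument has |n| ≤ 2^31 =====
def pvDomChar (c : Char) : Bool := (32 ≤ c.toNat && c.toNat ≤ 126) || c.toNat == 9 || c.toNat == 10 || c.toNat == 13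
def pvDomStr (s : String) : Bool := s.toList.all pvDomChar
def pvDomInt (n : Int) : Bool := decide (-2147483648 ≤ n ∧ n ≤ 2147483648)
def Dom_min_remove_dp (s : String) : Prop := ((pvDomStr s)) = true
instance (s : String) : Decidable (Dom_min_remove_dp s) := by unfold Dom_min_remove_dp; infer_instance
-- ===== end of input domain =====

-- B replaces A's bottom-up interval-DP table with a top-down recursion on (i, j); same O(n^2) cost.
-- (Source B memoizes the recursion in a dict; the memo is a pure cache, so the port below is the same recursion.)

-- ===== PORT A =====
-- dp[i][j] read; wherever A evaluates this inside Pre_ the indices are provably in range, so the getD defaults are never used there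
def pvGet2 (T : List (List Int)) (i j : Int) : Int :=
  (PySem.List.pyGet? ((PySem.List.pyGet? T i).getD []) j).getD 0

-- dp[i][j] = v; the indices A uses here are provably nonnegative and in range, so .toNat is exact
def pvSet2 (T : List (List Int)) (i j : Int) (v : Int) : List (List Int) :=
  T.set i.toNat ((T[i.toNat]?.getD []).set j.toNat v)

def min_remove_dp (s : String) : Int :=
  let cs := s.toList
  let n : Int := PySem.Str.len s
  -- dp = [[0] * n for _ in range(n)]  (n ≥ 0, so n.toNat = n exactly)
  let dp0 : List (List Int) := (PySem.List.pyRange 0 n 1).map (fun _ => List.replicate n.toNat (0 : Int))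
  let dp := (PySem.List.pyRange 2 (n + 1) 1).foldl (fun dp length =>
    (PySem.List.pyRange 0 (n - length + 1) 1).foldl (fun dp start =>
      let e := start + length - 1
      if PySem.List.pyGet? cs start == PySem.List.pyGet? cs e then
        pvSet2 dp start e (pvGet2 dp (start + 1) (e - 1) + (if 2 < length then 1 else 0))
      else
        pvSet2 dp start e (min (1 + pvGet2 dp (start + 1) e) (1 + pvGet2 dp start (e - 1)))) dp) dp0
  pvGet2 dp 0 (n - 1)

-- ===== PORT B =====
def pvSolve (cs : List Char) (i j : Int) : Int :=
  if i ≥ j then 0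
  else if PySem.List.pyGet? cs i == PySem.List.pyGet? cs j then
    pvSolve cs (i + 1) (j - 1) + (if 2 < j - i + 1 then 1 else 0)
  else
    1 + min (pvSolve cs (i + 1) j) (pvSolve cs i (j - 1))
termination_by (j - i + 1).toNat
decreasing_by all_goals omega

def min_remove_dp_alt (s : String) : Int :=
  pvSolve s.toList 0 (PySem.Str.len s - 1)

-- ===== PRECONDITION & SPEC =====
-- Pre_ excludes only the empty string, on which A raises IndexError (dp[0][-1] on an empty table)
def Pre_min_remove_dp (s : String) : Prop := s ≠ ""
instance (s : String) : Decidable (Pre_min_remove_dp s) := by unfold Pre_min_remove_dp; infer_instance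
def pvWitness_min_remove_dp : String := "abcbb"

def Spec_min_remove_dp (s : String) (out : Int) : Prop := out = min_remove_dp_alt s
instance (s : String) (out : Int) : Decidable (Spec_min_remove_dp s out) := by unfold Spec_min_remove_dp; infer_instance

-- ===== CLAIM (what is proved, stated in full; the proofs are below) =====
def Claim_equal_min_remove_dp : Prop := ∀ (s : String), Dom_min_remove_dp s → Pre_min_remove_dp s → Spec_min_remove_dp s (min_remove_dp s)

-- ===== LEMMAS AND PROOFS =====

-- which table entries hold their final value after lengths < L are done and, at length L, starts < S are done
def pvDoneB (L S i j : Int) : Bool :=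
  decide (j ≤ i) || decide (j - i + 1 < L) || (decide (j - i + 1 = L) && decide (i < S))

-- invariant of A's table: finished entries hold B's value, the rest still hold 0
def pvTab (cs : List Char) (L S : Int) (T : List (List Int)) : Prop :=
  T.length = cs.length ∧ (∀ r ∈ T, r.length = cs.length) ∧
  ∀ i j : Int, 0 ≤ i → i < (cs.length : Int) → 0 ≤ j → j < (cs.length : Int) →
    pvGet2 T i j = if pvDoneB L S i j then pvSolve cs i j else 0

theorem pvSolve_base (cs : List Char) (i j : Int) (h : j ≤ i) : pvSolve cs i j = 0 := by
  rw [pvSolve]; simp [h]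

theorem pvSolve_lt (cs : List Char) (i j : Int) (h : i < j) :
    pvSolve cs i j =
      if PySem.List.pyGet? cs i == PySem.List.pyGet? cs j then
        pvSolve cs (i + 1) (j - 1) + (if 2 < j - i + 1 then 1 else 0)
      else
        1 + min (pvSolve cs (i + 1) j) (pvSolve cs i (j - 1)) := by
  rw [pvSolve]; simp [not_le.2 h, ge_iff_le]

theorem pvGet2_nonneg (T : List (List Int)) (i j : Int) (hi : 0 ≤ i) (hj : 0 ≤ j) :
    pvGet2 T i j = ((T[i.toNat]?.getD [])[j.toNat]?).getD 0 := by
  obtain ⟨a, rfl⟩ : ∃ a : Nat, i = (a : Int) := ⟨i.toNat, (Int.toNat_of_nonneg hi).symm⟩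
  obtain ⟨b, rfl⟩ : ∃ b : Nat, j = (b : Int) := ⟨j.toNat, (Int.toNat_of_nonneg hj).symm⟩
  simp [pvGet2]

theorem pvSet2_length (T : List (List Int)) (i j v) : (pvSet2 T i j v).length = T.length := by
  simp [pvSet2]

theorem pvSet2_rows (T : List (List Int)) (i j v) (n : Nat) (h : ∀ r ∈ T, r.length = n) :
    ∀ r ∈ pvSet2 T i j v, r.length = n := by
  intro r hr
  by_cases hlen : i.toNat < T.length
  · rcases List.mem_or_eq_of_mem_set hr with h' | h'
    · exact h r h'
    · subst h'
      rw [List.getElem?_eq_getElem hlen, Option.getD_some, List.length_set]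
      exact h _ (List.getElem_mem hlen)
  · rw [pvSet2, List.set_eq_of_length_le (by omega)] at hr
    exact h r hr

theorem pvGet2_set2_same (T : List (List Int)) (i j v : Int) (hi : 0 ≤ i) (hj : 0 ≤ j)
    (hi' : i.toNat < T.length) (hj' : j.toNat < (T[i.toNat]?.getD []).length) :
    pvGet2 (pvSet2 T i j v) i j = v := by
  rw [pvGet2_nonneg _ _ _ hi hj, pvSet2]
  rw [List.getElem?_set_self hi']
  simp [List.getElem?_set_self hj']

theorem pvGet2_set2_ne (T : List (List Int)) (i j i' j' v : Int) (hi : 0 ≤ i) (hj : 0 ≤ j)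
    (hi' : 0 ≤ i') (hj' : 0 ≤ j') (hne : i' ≠ i ∨ j' ≠ j) :
    pvGet2 (pvSet2 T i j v) i' j' = pvGet2 T i' j' := by
  rw [pvGet2_nonneg _ _ _ hi' hj', pvGet2_nonneg _ _ _ hi' hj', pvSet2]
  by_cases hii : i'.toNat = i.toNat
  · have hji : j'.toNat ≠ j.toNat := by omega
    rw [hii]
    by_cases hlen : i.toNat < T.length
    · rw [List.getElem?_set_self hlen]
      simp [List.getElem?_set_ne (by omega : j.toNat ≠ j'.toNat)]
    · rw [List.getElem?_set]
      simp [hlen]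
  · rw [List.getElem?_set_ne (by omega : i.toNat ≠ i'.toNat)]

-- generic invariant rule for a fold over range(a, b)
theorem foldl_pyRange_one_inv {α : Type} (body : α → Int → α) (Inv : Int → α → Prop)
    (a b : Int) (acc : α) (hab : a ≤ b)
    (hstep : ∀ k x, a ≤ k → k < b → Inv k x → Inv (k + 1) (body x k))
    (h0 : Inv a acc) : Inv b ((PySem.List.pyRange a b 1).foldl body acc) := by
  by_cases h : a = b
  · subst h
    rw [PySem.List.pyRange_one_eq_nil le_rfl]
    exact h0
  · have hlt : a < b := lt_of_le_of_ne hab h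
    rw [PySem.List.pyRange_one_cons hlt]
    simp only [List.foldl_cons]
    have : ((b - (a + 1)).toNat) < ((b - a).toNat) := by omega
    exact foldl_pyRange_one_inv body Inv (a + 1) b (body acc a) (by omega)
      (fun k x hk hk' h' => hstep k x (by omega) hk' h') (hstep a acc le_rfl hlt h0)
termination_by (b - a).toNat

theorem pvTab_congr (cs : List Char) (L S L' S' : Int) (T : List (List Int))
    (h : pvTab cs L S T)
    (hd : ∀ i j : Int, 0 ≤ i → i < (cs.length : Int) → 0 ≤ j → j < (cs.length : Int) →
      pvDoneB L S i j = pvDoneB L' S' i j) : pvTab cs L' S' T := by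
  obtain ⟨h1, h2, h3⟩ := h
  exact ⟨h1, h2, fun i j hi hi' hj hj' => by
    rw [← hd i j hi hi' hj hj']; exact h3 i j hi hi' hj hj'⟩

theorem pvDoneB_iff (L S i j : Int) :
    pvDoneB L S i j = true ↔ (j ≤ i ∨ j - i + 1 < L ∨ (j - i + 1 = L ∧ i < S)) := by
  simp [pvDoneB, or_assoc]

-- one execution of A's inner-loop body preserves the invariant, advancing S
theorem pvTab_step (cs : List Char) (L S : Int) (T : List (List Int))
    (hL : 2 ≤ L) (hS : 0 ≤ S) (hSb : S < (cs.length : Int) - L + 1)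
    (h : pvTab cs L S T) :
    pvTab cs L (S + 1)
      (if PySem.List.pyGet? cs S == PySem.List.pyGet? cs (S + L - 1) then
        pvSet2 T S (S + L - 1) (pvGet2 T (S + 1) (S + L - 1 - 1) + (if 2 < L then 1 else 0))
      else
        pvSet2 T S (S + L - 1) (min (1 + pvGet2 T (S + 1) (S + L - 1)) (1 + pvGet2 T S (S + L - 1 - 1)))) := by
  obtain ⟨h1, h2, h3⟩ := h
  set e : Int := S + L - 1 with he
  have hN : (0 : Int) ≤ (cs.length : Int) := by positivity
  have heN : e < (cs.length : Int) := by omega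
  have hSe : S < e := by omega
  -- the freshly computed value is exactly B's value at (S, e)
  have hv : (if PySem.List.pyGet? cs S == PySem.List.pyGet? cs e then
        pvGet2 T (S + 1) (e - 1) + (if 2 < L then 1 else 0)
      else
        min (1 + pvGet2 T (S + 1) e) (1 + pvGet2 T S (e - 1))) = pvSolve cs S e := by
    have g1 : pvGet2 T (S + 1) (e - 1) = pvSolve cs (S + 1) (e - 1) := by
      rw [h3 (S + 1) (e - 1) (by omega) (by omega) (by omega) (by omega),
        if_pos (by rw [pvDoneB_iff]; omega)]
    have g2 : pvGet2 T (S + 1) e = pvSolve cs (S + 1) e := by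
      rw [h3 (S + 1) e (by omega) (by omega) (by omega) (by omega),
        if_pos (by rw [pvDoneB_iff]; omega)]
    have g3 : pvGet2 T S (e - 1) = pvSolve cs S (e - 1) := by
      rw [h3 S (e - 1) (by omega) (by omega) (by omega) (by omega),
        if_pos (by rw [pvDoneB_iff]; omega)]
    rw [g1, g2, g3, pvSolve_lt cs S e hSe]
    have hLe : e - S + 1 = L := by omega
    rw [hLe]
    by_cases hc : PySem.List.pyGet? cs S == PySem.List.pyGet? cs e
    · simp [hc]
    · simp only [hc, if_neg, Bool.false_eq_true, not_false_eq_true]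
      omega
  -- row bounds for the write
  have hrow : ∀ (w : Int), (pvSet2 T S e w).length = cs.length ∧
      (∀ r ∈ pvSet2 T S e w, r.length = cs.length) := fun w =>
    ⟨by rw [pvSet2_length, h1], pvSet2_rows T S e w cs.length h2⟩
  have hget : ∀ (w : Int), pvGet2 (pvSet2 T S e w) S e = w := by
    intro w
    have hS' : S.toNat < T.length := by omega
    apply pvGet2_set2_same T S e w (by omega) (by omega) hS'
    rw [List.getElem?_eq_getElem hS', Option.getD_some, h2 _ (List.getElem_mem hS')]
    omega
  have hkeep : ∀ (w i j : Int), 0 ≤ i → 0 ≤ j → (i ≠ S ∨ j ≠ e) →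
      pvGet2 (pvSet2 T S e w) i j = pvGet2 T i j := by
    intro w i j hi hj hne
    exact pvGet2_set2_ne T S e i j w (by omega) (by omega) hi hj hne
  -- assemble: writing B's value at (S, e) advances the invariant
  have main : ∀ w : Int, w = pvSolve cs S e → pvTab cs L (S + 1) (pvSet2 T S e w) := by
    intro w hw
    refine ⟨(hrow w).1, (hrow w).2, ?_⟩
    intro i j hi hi' hj hj'
    by_cases hij : i = S ∧ j = e
    · obtain ⟨rfl, rfl⟩ := hij
      rw [hget, hw, if_pos (by rw [pvDoneB_iff]; omega)]
    · have hne : i ≠ S ∨ j ≠ e := by tauto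
      have hd : pvDoneB L (S + 1) i j = pvDoneB L S i j := by
        rcases hne with hne | hne <;>
          (rw [Bool.eq_iff_iff, pvDoneB_iff, pvDoneB_iff]; omega)
      rw [hkeep w i j hi hj hne, h3 i j hi hi' hj hj', hd]
  split
  · next hc => exact main _ (by rw [← hv, if_pos hc])
  · next hc => exact main _ (by rw [← hv, if_neg hc])

-- the full bottom-up fold produces B's values at every finished entry
theorem pvTab_final (cs : List Char) :
    pvTab cs ((cs.length : Int) + 1) 0
      ((PySem.List.pyRange 2 ((cs.length : Int) + 1) 1).foldl (fun dp length =>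
        (PySem.List.pyRange 0 ((cs.length : Int) - length + 1) 1).foldl (fun dp start =>
          let e := start + length - 1
          if PySem.List.pyGet? cs start == PySem.List.pyGet? cs e then
            pvSet2 dp start e (pvGet2 dp (start + 1) (e - 1) + (if 2 < length then 1 else 0))
          else
            pvSet2 dp start e (min (1 + pvGet2 dp (start + 1) e) (1 + pvGet2 dp start (e - 1)))) dp)
        ((PySem.List.pyRange 0 (cs.length : Int) 1).map (fun _ => List.replicate ((cs.length : Int)).toNat (0 : Int)))) := by
  have hN : (0 : Int) ≤ (cs.length : Int) := by positivity
  by_cases hn : cs.length = 0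
  · -- empty string: both ranges are empty and the invariant is vacuous in its third clause's range
    rw [hn]
    simp only [Nat.cast_zero]
    rw [PySem.List.pyRange_one_eq_nil (by omega), PySem.List.pyRange_one_eq_nil (by omega)]
    refine ⟨by simp [hn], by simp, ?_⟩
    intro i j hi hi' hj hj'
    omega
  · refine foldl_pyRange_one_inv _ (fun L T => pvTab cs L 0 T) 2 ((cs.length : Int) + 1) _ (by omega) ?_ ?_
    · -- outer step: run the inner loop
      intro L T hL hL' hT
      have hinner : pvTab cs L ((cs.length : Int) - L + 1) _ :=
        foldl_pyRange_one_inv _ (fun S T => pvTab cs L S T) 0 ((cs.length : Int) - L + 1) T (by omega)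
          (fun S x hS hS' h => pvTab_step cs L S x hL hS hS' h) hT
      apply pvTab_congr cs L ((cs.length : Int) - L + 1) (L + 1) 0 _ hinner
      intro i j hi hi' hj hj'
      rw [Bool.eq_iff_iff, pvDoneB_iff, pvDoneB_iff]
      omega
    · -- initial table: all zeros, and only trivial entries are "done"
      refine ⟨by simp [PySem.List.length_pyRange_one], ?_, ?_⟩
      · intro r hr
        rw [List.mem_map] at hr
        obtain ⟨_, _, rfl⟩ := hr
        simp
      · intro i j hi hi' hj hj'
        rw [pvGet2_nonneg _ _ _ hi hj]
        have h1 : i.toNat < ((PySem.List.pyRange 0 (cs.length : Int) 1).map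
            (fun _ => List.replicate ((cs.length : Int)).toNat (0 : Int))).length := by
          simp [PySem.List.length_pyRange_one]; omega
        rw [List.getElem?_eq_getElem h1]
        simp only [List.getElem_map, Option.getD_some]
        rw [List.getElem?_replicate]
        have hj2 : j.toNat < ((cs.length : Int)).toNat := by omega
        simp only [hj2, if_pos, Option.getD_some]
        by_cases hd : pvDoneB ((2 : Int)) 0 i j
        · rw [if_pos hd]
          rw [pvDoneB_iff] at hd
          rw [pvSolve_base cs i j (by omega)]
        · rw [if_neg hd]

-- ===== VERDICT (by name: the statement is the Claim_ definition above) =====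
theorem min_remove_dp_spec : Claim_equal_min_remove_dp := by
  intro s _ hpre
  unfold Spec_min_remove_dp min_remove_dp min_remove_dp_alt
  simp only [PySem.Str.len_eq]
  have hT := pvTab_final s.toList
  obtain ⟨h1, h2, h3⟩ := hT
  have hn : 0 < s.toList.length := by
    rcases Nat.eq_zero_or_pos s.toList.length with h | h
    · exact absurd (by simpa using List.length_eq_zero_iff.mp h) hpre
    · exact h
  rw [h3 0 ((s.toList.length : Int) - 1) le_rfl (by omega) (by omega) (by omega)]
  rw [if_pos (by rw [pvDoneB_iff]; omega)]
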